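-- pv_equiv track=rewrite | github.com/PermutaTriangle/PermStruct | len_4_lists/correct_filter_insertion_encodable.py | is_incr_next_decr
-- ===== SOURCE A (Python) =====
-- def is_incr_next_decr(perm):
--     for i in range(len(perm) - 1):
--         if perm[i+1] < perm[i]:
--             for j in range(i+1,len(perm) - 1):
--                 if perm[j+1] > perm[j]:
--                     return False
--             break
--     return True
-- ===== SOURCE B (Python) =====
-- def is_incr_next_decr(perm):
--     n = len(perm)
--     first_descent = n
--     last_ascent = -1
--     for i in range(n - 1):
--         if perm[i + 1] < perm[i] and first_descent == n:
--             first_descent = i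
--         if perm[i + 1] > perm[i]:
--             last_ascent = i
--     return last_ascent < first_descent
-- ===== Notes on version B (the rewrite author's own statement) =====
-- stated objective: alternative
-- what changed: Replaced A's nested find-first-descent-then-scan-the-rest loops (with early return and break) by one flat pass computing two aggregate indices (first descent, last ascent) and a single final comparison last_ascent < first_descent.
import Mathlib
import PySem

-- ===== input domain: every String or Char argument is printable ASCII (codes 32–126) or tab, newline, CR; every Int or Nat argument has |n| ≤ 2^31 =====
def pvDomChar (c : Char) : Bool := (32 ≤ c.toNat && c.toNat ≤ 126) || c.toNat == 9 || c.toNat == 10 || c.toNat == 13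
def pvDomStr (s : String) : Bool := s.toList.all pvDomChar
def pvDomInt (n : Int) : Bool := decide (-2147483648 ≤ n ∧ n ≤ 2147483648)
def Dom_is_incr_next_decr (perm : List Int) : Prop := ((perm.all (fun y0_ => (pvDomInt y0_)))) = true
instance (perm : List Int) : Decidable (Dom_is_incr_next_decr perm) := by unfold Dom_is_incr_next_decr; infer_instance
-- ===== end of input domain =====

-- B replaces A's nested find-first-descent-then-scan-remainder loops by one flat pass
-- tracking first-descent and last-ascent indices and a final comparison (alternative decomposition, same cost).

-- ===== PORT A =====
-- inner loop: 'for j in range(i+1, len(perm)-1): if perm[j+1] > perm[j]: return False'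
def pvAInner (perm : List Int) : List Int → Bool
  | [] => true
  | j :: js =>
    if PySem.List.pyGetD perm (j+1) 0 > PySem.List.pyGetD perm j 0 then false
    else pvAInner perm js

-- outer loop: on the first descent, run the inner scan and break
def pvAOuter (perm : List Int) : List Int → Bool
  | [] => true
  | i :: is =>
    if PySem.List.pyGetD perm (i+1) 0 < PySem.List.pyGetD perm i 0 then
      pvAInner perm (PySem.List.pyRange (i+1) ((perm.length : Int) - 1) 1)
    else pvAOuter perm is

def is_incr_next_decr (perm : List Int) : Bool :=
  pvAOuter perm (PySem.List.pyRange 0 ((perm.length : Int) - 1) 1)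

-- ===== PORT B =====
def is_incr_next_decr_alt (perm : List Int) : Bool :=
  let n : Int := perm.length
  let s := (PySem.List.pyRange 0 (n - 1) 1).foldl
    (fun (s : Int × Int) i =>
      ( if PySem.List.pyGetD perm (i+1) 0 < PySem.List.pyGetD perm i 0 ∧ s.1 = n then i else s.1,
        if PySem.List.pyGetD perm (i+1) 0 > PySem.List.pyGetD perm i 0 then i else s.2 ))
    (n, -1)
  decide (s.2 < s.1)

-- ===== PRECONDITION & SPEC =====
def Spec_is_incr_next_decr (perm : List Int) (out : Bool) : Prop := out = is_incr_next_decr_alt perm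
instance (perm : List Int) (out : Bool) : Decidable (Spec_is_incr_next_decr perm out) := by unfold Spec_is_incr_next_decr; infer_instance

-- ===== CLAIM (what is proved, stated in full; the proofs are below) =====
def Claim_equal_is_incr_next_decr : Prop := ∀ (perm : List Int), Dom_is_incr_next_decr perm → Spec_is_incr_next_decr perm (is_incr_next_decr perm)

-- ===== LEMMAS AND PROOFS =====

-- adjacent descent / ascent at index i
def pvDesc (perm : List Int) (i : Int) : Prop :=
  PySem.List.pyGetD perm (i+1) 0 < PySem.List.pyGetD perm i 0
def pvAsc (perm : List Int) (i : Int) : Prop :=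
  PySem.List.pyGetD perm (i+1) 0 > PySem.List.pyGetD perm i 0

-- A's inner scan over range(a, m) returns true iff no ascent there
theorem pvAInner_spec (perm : List Int) (a m : Int) :
    pvAInner perm (PySem.List.pyRange a m 1) = true ↔
      ∀ j, a ≤ j → j < m → ¬ pvAsc perm j := by
  by_cases h : m ≤ a
  · rw [PySem.List.pyRange_one_eq_nil h]
    simp only [pvAInner, true_iff]
    exact fun j h1 h2 => absurd h1 (by omega)
  · have h' : a < m := by omega
    rw [PySem.List.pyRange_one_cons h']
    have ih := pvAInner_spec perm (a+1) m
    simp only [pvAInner]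
    split_ifs with hd
    · simp only [false_iff]
      intro H
      exact absurd hd (H a le_rfl h')
    · rw [ih]
      constructor
      · intro H j hj1 hj2
        rcases eq_or_lt_of_le hj1 with rfl | hj1'
        · exact hd
        · exact H j (by omega) hj2
      · intro H j hj1 hj2
        exact H j (by omega) hj2
termination_by (m - a).toNat
decreasing_by omega

-- A's outer loop over range(a, n-1) returns true iff no ascent follows a descent
theorem pvAOuter_spec (perm : List Int) (a : Int) :
    pvAOuter perm (PySem.List.pyRange a ((perm.length : Int) - 1) 1) = true ↔
      ∀ i j, a ≤ i → i < j → j < (perm.length : Int) - 1 →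
        pvDesc perm i → ¬ pvAsc perm j := by
  set m : Int := (perm.length : Int) - 1 with hm
  by_cases h : m ≤ a
  · rw [PySem.List.pyRange_one_eq_nil h]
    simp only [pvAOuter, true_iff]
    exact fun i j h1 h2 h3 => absurd h1 (by omega)
  · have h' : a < m := by omega
    rw [PySem.List.pyRange_one_cons h']
    have ih := pvAOuter_spec perm (a+1)
    rw [← hm] at ih
    simp only [pvAOuter, ← hm]
    split_ifs with hd
    · rw [pvAInner_spec perm (a+1) m]
      constructor
      · intro H i j h1 h2 h3 _
        exact H j (by omega) h3
      · intro H j hj1 hj2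
        exact H a j le_rfl (by omega) hj2 hd
    · rw [ih]
      constructor
      · intro H i j h1 h2 h3 hdi
        rcases eq_or_lt_of_le h1 with rfl | h1'
        · exact absurd hdi hd
        · exact H i j (by omega) h2 h3 hdi
      · intro H i j h1 h2 h3 hdi
        exact H i j (by omega) h2 h3 hdi
termination_by ((perm.length : Int) - 1 - a).toNat
decreasing_by omega

-- once first_descent has been set (≠ n), it never changes
theorem pvFd_frozen (perm : List Int) (n : Int) (l : List Int) (fd : Int) (hfd : fd ≠ n) :
    l.foldl (fun fd i =>
        if PySem.List.pyGetD perm (i+1) 0 < PySem.List.pyGetD perm i 0 ∧ fd = n then i else fd) fd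
      = fd := by
  induction l with
  | nil => rfl
  | cons x xs ih =>
    simp only [List.foldl_cons]
    rw [if_neg (by tauto), ih]

-- first_descent fold over range(a, m), started at n (with m ≤ n), yields n if no descent,
-- else the first descent index
theorem pvFd_spec (perm : List Int) (n m : Int) (hmn : m ≤ n) (a : Int) :
    (let R := (PySem.List.pyRange a m 1).foldl (fun fd i =>
        if PySem.List.pyGetD perm (i+1) 0 < PySem.List.pyGetD perm i 0 ∧ fd = n then i else fd) n
     (R = n ∧ ∀ i, a ≤ i → i < m → ¬ pvDesc perm i) ∨
       (a ≤ R ∧ R < m ∧ pvDesc perm R ∧ ∀ i, a ≤ i → i < R → ¬ pvDesc perm i)) := by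
  by_cases h : m ≤ a
  · rw [PySem.List.pyRange_one_eq_nil h]
    exact Or.inl ⟨rfl, fun i h1 h2 => absurd h1 (by omega)⟩
  · have h' : a < m := by omega
    rw [PySem.List.pyRange_one_cons h', List.foldl_cons]
    by_cases hd : PySem.List.pyGetD perm (a+1) 0 < PySem.List.pyGetD perm a 0
    · rw [if_pos (And.intro hd (Eq.refl n)), pvFd_frozen perm n _ a (by omega)]
      exact Or.inr ⟨le_rfl, h', hd, fun i h1 h2 => absurd h1 (by omega)⟩
    · rw [if_neg (fun hc => hd hc.1)]
      rcases pvFd_spec perm n m hmn (a+1) with ⟨hR, hno⟩ | ⟨h1, h2, h3, h4⟩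
      · refine Or.inl ⟨hR, fun i hi1 hi2 => ?_⟩
        rcases eq_or_lt_of_le hi1 with rfl | hi1'
        · exact hd
        · exact hno i (by omega) hi2
      · refine Or.inr ⟨by omega, h2, h3, fun i hi1 hi2 => ?_⟩
        rcases eq_or_lt_of_le hi1 with rfl | hi1'
        · exact hd
        · exact h4 i (by omega) hi2
termination_by (m - a).toNat
decreasing_by omega

-- last_ascent fold over range(a, m), started below a, yields its start if no ascent,
-- else the last ascent index
theorem pvLa_spec (perm : List Int) (m a la0 : Int) (hla : la0 < a) :
    (let L := (PySem.List.pyRange a m 1).foldl (fun la i =>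
        if PySem.List.pyGetD perm (i+1) 0 > PySem.List.pyGetD perm i 0 then i else la) la0
     (L = la0 ∧ ∀ j, a ≤ j → j < m → ¬ pvAsc perm j) ∨
       (a ≤ L ∧ L < m ∧ pvAsc perm L ∧ ∀ j, L < j → j < m → ¬ pvAsc perm j)) := by
  by_cases h : m ≤ a
  · rw [PySem.List.pyRange_one_eq_nil h]
    exact Or.inl ⟨rfl, fun j h1 h2 => absurd h1 (by omega)⟩
  · have h' : a < m := by omega
    rw [PySem.List.pyRange_one_cons h', List.foldl_cons]
    by_cases ha : PySem.List.pyGetD perm (a+1) 0 > PySem.List.pyGetD perm a 0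
    · rw [if_pos ha]
      rcases pvLa_spec perm m (a+1) a (by omega) with ⟨hL, hno⟩ | ⟨h1, h2, h3, h4⟩
      · refine Or.inr ⟨by omega, by omega, ?_, fun j hj1 hj2 => hno j (by omega) hj2⟩
        rw [hL]; exact ha
      · exact Or.inr ⟨by omega, h2, h3, h4⟩
    · rw [if_neg ha]
      rcases pvLa_spec perm m (a+1) la0 (by omega) with ⟨hL, hno⟩ | ⟨h1, h2, h3, h4⟩
      · refine Or.inl ⟨hL, fun j hj1 hj2 => ?_⟩
        rcases eq_or_lt_of_le hj1 with rfl | hj1'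
        · exact ha
        · exact hno j (by omega) hj2
      · exact Or.inr ⟨by omega, h2, h3, h4⟩
termination_by (m - a).toNat
decreasing_by all_goals omega

-- no index is both a descent and an ascent
theorem pvDesc_asc_exclusive (perm : List Int) (i : Int) :
    pvDesc perm i → pvAsc perm i → False := by
  unfold pvDesc pvAsc
  intro h1 h2
  omega

-- ===== VERDICT (by name: the statement is the Claim_ definition above) =====
theorem is_incr_next_decr_spec : Claim_equal_is_incr_next_decr := by
  unfold Claim_equal_is_incr_next_decr
  intro perm _
  unfold Spec_is_incr_next_decr is_incr_next_decr is_incr_next_decr_alt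
  dsimp only
  set n : Int := (perm.length : Int) with hn
  rw [PySem.List.foldl_prod_mk
      (f := fun fd i =>
        if PySem.List.pyGetD perm (i+1) 0 < PySem.List.pyGetD perm i 0 ∧ fd = n then i else fd)
      (g := fun la i =>
        if PySem.List.pyGetD perm (i+1) 0 > PySem.List.pyGetD perm i 0 then i else la)]
  dsimp only
  have hfd := pvFd_spec perm n (n - 1) (by omega) 0
  have hla := pvLa_spec perm (n - 1) 0 (-1) (by omega)
  dsimp only at hfd hla
  set R : Int := (PySem.List.pyRange 0 (n-1) 1).foldl (fun fd i =>
      if PySem.List.pyGetD perm (i+1) 0 < PySem.List.pyGetD perm i 0 ∧ fd = n then i else fd) n with hRdef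
  set L : Int := (PySem.List.pyRange 0 (n-1) 1).foldl (fun la i =>
      if PySem.List.pyGetD perm (i+1) 0 > PySem.List.pyGetD perm i 0 then i else la) (-1) with hLdef
  have hn0 : 0 ≤ n := by rw [hn]; exact Int.natCast_nonneg _
  rw [Bool.eq_iff_iff, decide_eq_true_iff, pvAOuter_spec perm 0, ← hn]
  constructor
  · intro H
    rcases hla with ⟨hL1, _⟩ | ⟨hL1, hL2, hL3, _⟩
    · rcases hfd with ⟨hR1, _⟩ | ⟨hR1, _, _, _⟩ <;> omega
    · rcases hfd with ⟨hR1, _⟩ | ⟨hR1, hR2, hR3, _⟩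
      · omega
      · by_contra hc
        have hc' : R ≤ L := by omega
        rcases eq_or_lt_of_le hc' with he | hlt
        · rw [he] at hR3
          exact pvDesc_asc_exclusive perm L hR3 hL3
        · exact H R L hR1 hlt hL2 hR3 hL3
  · intro H i j h1 h2 h3 hdi haj
    rcases hfd with ⟨_, hnoD⟩ | ⟨_, _, _, hfirst⟩
    · exact hnoD i h1 (by omega) hdi
    · rcases hla with ⟨_, hnoA⟩ | ⟨_, _, _, hlast⟩
      · exact hnoA j (by omega) h3 haj
      · have hRi : R ≤ i := by
          by_contra hri
          exact hfirst i h1 (by omega) hdi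
        have hjL : j ≤ L := by
          by_contra hjl
          exact hlast j (by omega) h3 haj
        omega
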